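-- pv_equiv track=rewrite | github.com/ceresman/ananke | tests/test_lines.py | get_page_one
-- ===== SOURCE A (Python) =====
-- def get_page_one(page_one):
--     author_flag = True
--     author_texts = []
--     abstract_ix = -1
--     abstract, title = "", ""
--     page_text = ""
--     for ix, line in enumerate(page_one.get("lines"), start = 0):
--         if ix == 0:
--             title = line.get('text')
--         else:
--             if ix > 8:
--                 page_text = page_text + line.get("text")
--             if "abstract" in line.get("text").lower():
--                 abstract_ix = ix
--
--             if abstract_ix != -1 and ix > abstract_ix:
--                 abstract = abstract + " " + line.get("text")
--
--             if author_flag and abstract_ix == -1: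
--                 author_texts.append(line.get('text'))
--
--     if abstract_ix == -1:
--         abstract = page_text
--     return title, author_texts, abstract
-- ===== SOURCE B (Python) =====
-- def get_page_one(page_one):
--     lines = page_one.get("lines")
--     texts = [line.get("text") for line in lines]
--     title = texts[0] if texts else ""
--     f = next((ix for ix in range(1, len(texts)) if "abstract" in texts[ix].lower()), None)
--     if f is None:
--         return title, texts[1:], "".join(texts[9:])
--     authors = texts[1:f]
--     abstract = "".join(" " + t for t in texts[f + 1:] if "abstract" not in t.lower())
--     return title, authors, abstract
-- ===== Notes on version B (the rewrite author's own statement) =====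
-- stated objective: simpler
-- what changed: Replaces A's single stateful loop (five mutable accumulators and a running abstract index) by a direct decomposition: extract the text list once, locate the first 'abstract' line with a single search, and build title/authors/abstract from slices and one filtered join.
-- outside the precondition, e.g. on get_page_one({'lines': [{}]}): A returns (None, [], ''), B returns (None, [], '')
import Mathlib
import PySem

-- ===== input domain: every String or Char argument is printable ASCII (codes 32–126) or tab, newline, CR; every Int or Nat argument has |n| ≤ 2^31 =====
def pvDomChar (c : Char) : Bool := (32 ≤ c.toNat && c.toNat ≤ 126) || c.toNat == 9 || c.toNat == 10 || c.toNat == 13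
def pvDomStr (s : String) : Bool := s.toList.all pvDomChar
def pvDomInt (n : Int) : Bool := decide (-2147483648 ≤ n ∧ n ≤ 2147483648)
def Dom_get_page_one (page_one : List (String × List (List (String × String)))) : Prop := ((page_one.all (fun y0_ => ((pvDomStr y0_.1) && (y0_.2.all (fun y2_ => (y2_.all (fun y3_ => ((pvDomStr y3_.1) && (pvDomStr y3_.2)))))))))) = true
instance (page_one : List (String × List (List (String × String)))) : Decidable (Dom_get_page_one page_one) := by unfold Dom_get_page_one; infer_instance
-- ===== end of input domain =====

-- B replaces A's single five-accumulator loop by a direct decomposition (find the first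
-- 'abstract' line, then slices and one filtered join); same cost, simpler.


-- ===== PORT A =====
-- loop body of A; state = (title, author_texts, abstract_ix, abstract, page_text)
def pvStepA (s : String × List String × Int × String × String)
    (p : Int × List (String × String)) : String × List String × Int × String × String :=
  let text := (List.lookup "text" p.2).getD ""   -- Pre_ guarantees the key is present
  if p.1 == 0 then (text, s.2.1, s.2.2.1, s.2.2.2.1, s.2.2.2.2)
  else
    let page_text := if p.1 > 8 then s.2.2.2.2 ++ text else s.2.2.2.2
    let abstract_ix := if PySem.Str.isIn "abstract" (PySem.Str.lower text) then p.1 else s.2.2.1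
    let abstract := if abstract_ix != -1 && p.1 > abstract_ix then s.2.2.2.1 ++ " " ++ text else s.2.2.2.1
    let author_texts := if abstract_ix == -1 then s.2.1 ++ [text] else s.2.1
    (s.1, author_texts, abstract_ix, abstract, page_text)

def get_page_one (page_one : List (String × List (List (String × String)))) : String × List String × String :=
  let lines := (List.lookup "lines" page_one).getD []   -- Pre_ guarantees the key is present
  let s := (PySem.List.enumerate lines 0).foldl pvStepA ("", [], (-1 : Int), "", "")
  (s.1, s.2.1, if s.2.2.1 == -1 then s.2.2.2.2 else s.2.2.2.1)

-- ===== PORT B =====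
def pvHasAbstract (t : String) : Bool := PySem.Str.isIn "abstract" (PySem.Str.lower t)

def get_page_one_alt (page_one : List (String × List (List (String × String)))) : String × List String × String :=
  let lines := (List.lookup "lines" page_one).getD []
  let texts := lines.map (fun l => (List.lookup "text" l).getD "")
  let title := match texts with | [] => "" | t :: _ => t
  match (texts.drop 1).findIdx? pvHasAbstract with
  | none => (title, texts.drop 1, PySem.Str.join "" (texts.drop 9))
  | some k =>
      let f := k + 1
      (title, (texts.drop 1).take k,
        PySem.Str.join "" (((texts.drop (f + 1)).filter (fun t => !pvHasAbstract t)).map (fun t => " " ++ t)))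

-- ===== PRECONDITION & SPEC =====
-- Pre_ excludes inputs on which A raises (no "lines" key, or a later line without "text")
-- and the first line missing "text", where A returns None as title — not a String.
def Pre_get_page_one (page_one : List (String × List (List (String × String)))) : Prop :=
  (List.lookup "lines" page_one).isSome ∧
  ∀ l ∈ (List.lookup "lines" page_one).getD [], (List.lookup "text" l).isSome

instance (page_one : List (String × List (List (String × String)))) : Decidable (Pre_get_page_one page_one) := by
  unfold Pre_get_page_one; infer_instance

def pvWitness_get_page_one : (List (String × List (List (String × String)))) :=
  [("lines", [[("text", "A Title")], [("text", "Alice, Bob")], [("text", "Abstract.")], [("text", "We study things.")]])]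

def Spec_get_page_one (page_one : List (String × List (List (String × String)))) (out : String × List String × String) : Prop := out = get_page_one_alt page_one
instance (page_one : List (String × List (List (String × String)))) (out : String × List String × String) : Decidable (Spec_get_page_one page_one out) := by unfold Spec_get_page_one; infer_instance

-- ===== CLAIM (what is proved, stated in full; the proofs are below) =====
def Claim_equal_get_page_one : Prop := ∀ (page_one : List (String × List (List (String × String)))), Dom_get_page_one page_one → Pre_get_page_one page_one → Spec_get_page_one page_one (get_page_one page_one)

-- ===== LEMMAS AND PROOFS =====

-- text-level loop body: pvStepA on a line whose text we already extracted
def pvStepT (s : String × List String × Int × String × String)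
    (p : Int × String) : String × List String × Int × String × String :=
  if p.1 == 0 then (p.2, s.2.1, s.2.2.1, s.2.2.2.1, s.2.2.2.2)
  else
    let page_text := if p.1 > 8 then s.2.2.2.2 ++ p.2 else s.2.2.2.2
    let abstract_ix := if pvHasAbstract p.2 then p.1 else s.2.2.1
    let abstract := if abstract_ix != -1 && p.1 > abstract_ix then s.2.2.2.1 ++ " " ++ p.2 else s.2.2.2.1
    let author_texts := if abstract_ix == -1 then s.2.1 ++ [p.2] else s.2.1
    (s.1, author_texts, abstract_ix, abstract, page_text)

theorem pvStepA_eq (s : String × List String × Int × String × String)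
    (p : Int × List (String × String)) :
    pvStepA s p = pvStepT s (p.1, (List.lookup "text" p.2).getD "") := by
  simp [pvStepA, pvStepT, pvHasAbstract]

theorem pvEnumerate_map {α β : Type} (f : α → β) (l : List α) (s : Int) :
    PySem.List.enumerate (l.map f) s = (PySem.List.enumerate l s).map (fun p => (p.1, f p.2)) := by
  induction l generalizing s with
  | nil => simp [PySem.List.enumerate_nil]
  | cons x xs ih => simp [PySem.List.enumerate_cons, ih]

theorem pvJoin_nil : PySem.Str.join "" ([] : List String) = "" := by decide

theorem pvJoin_cons (t : String) (l : List String) :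
    PySem.Str.join "" (t :: l) = t ++ PySem.Str.join "" l := by
  cases l <;> simp [PySem.Str.join, PySem.Chars.join_cons_cons]

-- phase 2: abstract index already set (0 ≤ a < j); authors frozen, abstract collects non-abstract texts
theorem pvPhase2 (ts : List String) : ∀ (j : Nat) (a : Int) (ti : String) (au : List String) (ab pt : String),
    1 ≤ j → 0 ≤ a → a < (j : Int) →
    ((PySem.List.enumerate ts (j : Int)).foldl pvStepT (ti, au, a, ab, pt)).1 = ti ∧
    ((PySem.List.enumerate ts (j : Int)).foldl pvStepT (ti, au, a, ab, pt)).2.1 = au ∧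
    (((PySem.List.enumerate ts (j : Int)).foldl pvStepT (ti, au, a, ab, pt)).2.2.1 == -1) = false ∧
    ((PySem.List.enumerate ts (j : Int)).foldl pvStepT (ti, au, a, ab, pt)).2.2.2.1 =
      ab ++ PySem.Str.join "" ((ts.filter (fun t => !pvHasAbstract t)).map (fun t => " " ++ t)) := by
  induction ts with
  | nil =>
    intro j a ti au ab pt hj ha haj
    refine ⟨rfl, rfl, ?_, by simp [PySem.List.enumerate_nil, pvJoin_nil]⟩
    simp [PySem.List.enumerate_nil]
    omega
  | cons t ts ih =>
    intro j a ti au ab pt hj ha haj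
    have hj0 : ((j:Int) == 0) = false := by simp; omega
    rw [PySem.List.enumerate_cons, List.foldl_cons]
    by_cases hp : pvHasAbstract t
    · have hstep : pvStepT (ti, au, a, ab, pt) ((j:Int), t) =
        (ti, au, (j:Int), ab, if (j:Int) > 8 then pt ++ t else pt) := by
        simp [pvStepT, hj0, hp]; try omega
      rw [hstep]
      have : ((j:Int) + 1) = ((j+1 : Nat) : Int) := by push_cast; ring
      rw [this]
      have h := ih (j+1) (j:Int) ti au ab (if (j:Int) > 8 then pt ++ t else pt)
        (by omega) (by positivity) (by push_cast; omega)
      simpa [hp] using h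
    · have hstep : pvStepT (ti, au, a, ab, pt) ((j:Int), t) =
        (ti, au, a, ab ++ " " ++ t, if (j:Int) > 8 then pt ++ t else pt) := by
        simp [pvStepT, hj0, hp]; try omega
      rw [hstep]
      have hc : ((j:Int) + 1) = ((j+1 : Nat) : Int) := by push_cast; ring
      rw [hc]
      have h := ih (j+1) a ti au (ab ++ " " ++ t) (if (j:Int) > 8 then pt ++ t else pt)
        (by omega) ha (by push_cast; omega)
      simpa [hp, pvJoin_cons, String.append_assoc] using h

-- page_text step: appending (if j>8) then joining the rest equals joining drop (9-j)
theorem pvPT (t : String) (ts : List String) (j : Nat) (hj : 1 ≤ j) (pt : String) :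
    (if ((j:Int)) > 8 then pt ++ t else pt) ++ PySem.Str.join "" (ts.drop (9 - (j+1))) =
      pt ++ PySem.Str.join "" ((t :: ts).drop (9 - j)) := by
  by_cases h : 9 ≤ j
  · have h8 : ((8:Int)) < (j:Int) := by exact_mod_cast Nat.lt_of_lt_of_le (by norm_num) h
    have e1 : 9 - j = 0 := by omega
    have e2 : 9 - (j+1) = 0 := by omega
    simp [e1, e2, h8, pvJoin_cons, String.append_assoc]
  · have h8 : ¬ ((8:Int)) < (j:Int) := by omega
    have e1 : 9 - j = (9 - (j+1)) + 1 := by omega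
    simp [h8, e1, List.drop_succ_cons]

-- phase 1: no abstract seen yet; find the first abstract line (if any) and hand over to phase 2
theorem pvPhase1 (ts : List String) : ∀ (j : Nat) (ti : String) (au : List String) (ab pt : String), 1 ≤ j →
    match ts.findIdx? pvHasAbstract with
    | none =>
        (PySem.List.enumerate ts (j : Int)).foldl pvStepT (ti, au, (-1:Int), ab, pt) =
          (ti, au ++ ts, (-1:Int), ab, pt ++ PySem.Str.join "" (ts.drop (9 - j)))
    | some k =>
        ((PySem.List.enumerate ts (j : Int)).foldl pvStepT (ti, au, (-1:Int), ab, pt)).1 = ti ∧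
        ((PySem.List.enumerate ts (j : Int)).foldl pvStepT (ti, au, (-1:Int), ab, pt)).2.1 = au ++ ts.take k ∧
        (((PySem.List.enumerate ts (j : Int)).foldl pvStepT (ti, au, (-1:Int), ab, pt)).2.2.1 == -1) = false ∧
        ((PySem.List.enumerate ts (j : Int)).foldl pvStepT (ti, au, (-1:Int), ab, pt)).2.2.2.1 =
          ab ++ PySem.Str.join "" (((ts.drop (k+1)).filter (fun t => !pvHasAbstract t)).map (fun t => " " ++ t)) := by
  induction ts with
  | nil =>
    intro j ti au ab pt hj
    simp [PySem.List.enumerate_nil, pvJoin_nil]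
  | cons t ts ih =>
    intro j ti au ab pt hj
    have hj0 : ((j:Int) == 0) = false := by simp; omega
    by_cases hp : pvHasAbstract t
    · have hstep : pvStepT (ti, au, (-1:Int), ab, pt) ((j:Int), t) =
        (ti, au, (j:Int), ab, if (j:Int) > 8 then pt ++ t else pt) := by
        simp [pvStepT, hj0, hp]; try omega
      have hc : ((j:Int) + 1) = ((j+1 : Nat) : Int) := by push_cast; ring
      have h2 := pvPhase2 ts (j+1) (j:Int) ti au ab (if (j:Int) > 8 then pt ++ t else pt)
        (by omega) (by positivity) (by push_cast; omega)
      simp only [List.findIdx?_cons, hp, if_pos]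
      rw [PySem.List.enumerate_cons, List.foldl_cons, hstep, hc]
      simpa using h2
    · have hstep : pvStepT (ti, au, (-1:Int), ab, pt) ((j:Int), t) =
        (ti, au ++ [t], (-1:Int), ab, if (j:Int) > 8 then pt ++ t else pt) := by
        simp [pvStepT, hj0, hp]; try omega
      have hc : ((j:Int) + 1) = ((j+1 : Nat) : Int) := by push_cast; ring
      have h1 := ih (j+1) ti (au ++ [t]) ab (if (j:Int) > 8 then pt ++ t else pt) (by omega)
      simp only [List.findIdx?_cons, hp, if_neg, Bool.false_eq_true, not_false_iff]
      rw [PySem.List.enumerate_cons, List.foldl_cons, hstep, hc]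
      cases hf : ts.findIdx? pvHasAbstract with
      | none =>
        rw [hf] at h1
        simp only [Option.map_none]
        rw [h1, pvPT t ts j hj pt]
        simp
      | some k =>
        rw [hf] at h1
        simp only [Option.map_some]
        refine ⟨h1.1, ?_, h1.2.2.1, ?_⟩
        · rw [h1.2.1]; simp [List.take_succ_cons]
        · rw [h1.2.2.2]; simp [List.drop_succ_cons]

theorem pvMain (lines : List (List (String × String))) :
    (let s := (PySem.List.enumerate lines 0).foldl pvStepA ("", [], (-1:Int), "", "");
     (s.1, s.2.1, if s.2.2.1 == -1 then s.2.2.2.2 else s.2.2.2.1)) =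
    (let texts := lines.map (fun l => (List.lookup "text" l).getD "");
     let title := match texts with | [] => "" | t :: _ => t;
     match (texts.drop 1).findIdx? pvHasAbstract with
     | none => (title, texts.drop 1, PySem.Str.join "" (texts.drop 9))
     | some k =>
         let f := k + 1;
         (title, (texts.drop 1).take k,
           PySem.Str.join "" (((texts.drop (f + 1)).filter (fun t => !pvHasAbstract t)).map (fun t => " " ++ t)))) := by
  have hA : pvStepA = fun s (p : Int × List (String × String)) =>
      pvStepT s (p.1, (List.lookup "text" p.2).getD "") := by
    funext s p; exact pvStepA_eq s p
  dsimp only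
  rw [hA, show ((PySem.List.enumerate lines 0).foldl
        (fun s (p : Int × List (String × String)) => pvStepT s (p.1, (List.lookup "text" p.2).getD ""))
        ("", [], (-1:Int), "", "")) =
      ((PySem.List.enumerate (lines.map (fun l => (List.lookup "text" l).getD "")) 0).foldl
        pvStepT ("", [], (-1:Int), "", "")) by
    rw [pvEnumerate_map, List.foldl_map]]
  cases htx : lines.map (fun l => (List.lookup "text" l).getD "") with
  | nil => simp [PySem.List.enumerate_nil, pvJoin_nil]
  | cons t0 ts =>
    rw [PySem.List.enumerate_cons, List.foldl_cons]
    have hstep0 : pvStepT ("", [], (-1:Int), "", "") ((0:Int), t0) = (t0, [], (-1:Int), "", "") := by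
      simp [pvStepT]
    rw [hstep0]
    have h1 := pvPhase1 ts 1 t0 [] "" "" (le_refl 1)
    have hc : ((0:Int) + 1) = ((1 : Nat) : Int) := by norm_num
    rw [hc]
    cases hf : ts.findIdx? pvHasAbstract with
    | none =>
      rw [hf] at h1
      rw [h1]
      simp [hf]
    | some k =>
      rw [hf] at h1
      simp only [List.drop_succ_cons]
      rw [h1.2.2.1, h1.1, h1.2.1, h1.2.2.2]
      simp [hf]

theorem get_page_one_spec : Claim_equal_get_page_one := by
  intro page_one _ _
  exact pvMain ((List.lookup "lines" page_one).getD [])
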